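-- pv_equiv track=rewrite | github.com/Alexandru-Vasilica/laborator-python-2024 | lab3/main.py | ex9
-- ===== SOURCE A (Python) =====
-- def ex9(seats: list[list[int]]):
--     # Write a function that receives as paramer a matrix which represents the heights of the spectators in a stadium and will return a list of tuples (line, column) each one representing a seat of a spectator which can't see the game. A spectator can't see the game if there is at least one taller spectator standing in front of him. All the seats are occupied. All the seats are at the same level. Row and column indexing starts from 0, beginning with the closest row from the field.
--     results = []
--     for j, col in enumerate(zip(*seats)):
--         in_front = 0
--         for i, h in enumerate(col):
--             if h <= in_front:
--                 results.append((i, j))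
--             else:
--                 in_front = h
--     return results
-- ===== SOURCE B (Python) =====
-- def ex9(seats: list[list[int]]):
--     # Row-major single pass: keep per-column running maxima and per-column
--     # buckets of blocked seats; concatenate buckets in column order.
--     ncols = min((len(r) for r in seats), default=0)
--     state = [(0, []) for _ in range(ncols)]  # (max height so far, bucket) per column
--     for i, row in enumerate(seats):
--         state = [(m, b + [(i, j)]) if row[j] <= m else (row[j], b)
--                  for j, (m, b) in enumerate(state)]
--     return [p for (_, b) in state for p in b]
-- ===== Notes on version B (the rewrite author's own statement) =====
-- stated objective: alternative
-- what changed: Instead of transposing the matrix with zip(*seats) and scanning each column with a single running maximum, B makes one row-major pass over the original rows, maintaining a per-column (running maximum, bucket of blocked seats) pair, and concatenates the buckets in column order.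
import Mathlib
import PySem

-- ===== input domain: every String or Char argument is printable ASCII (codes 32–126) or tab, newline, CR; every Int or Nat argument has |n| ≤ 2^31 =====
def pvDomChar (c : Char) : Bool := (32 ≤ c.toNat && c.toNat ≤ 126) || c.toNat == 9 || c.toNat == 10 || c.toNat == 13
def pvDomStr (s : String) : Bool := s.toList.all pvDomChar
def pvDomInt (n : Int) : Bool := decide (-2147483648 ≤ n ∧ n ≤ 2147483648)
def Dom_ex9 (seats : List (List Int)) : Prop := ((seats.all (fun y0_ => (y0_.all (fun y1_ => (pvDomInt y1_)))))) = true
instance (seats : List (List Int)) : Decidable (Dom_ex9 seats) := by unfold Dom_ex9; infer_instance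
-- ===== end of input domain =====

-- B replaces A's transpose-then-column-scan by a single row-major pass that keeps
-- per-column running maxima and per-column buckets (objective: alternative).

-- ===== PORT A =====

-- zip(*seats): Python's zip truncates at the shortest row; exact hand port.
def pyZipAll (ls : List (List Int)) : List (List Int) :=
  if h : ls.isEmpty = true ∨ ls.any (fun l => l.isEmpty) = true then []
  else (ls.map (fun l => l.headD 0)) :: pyZipAll (ls.map (fun l => l.tail))
termination_by (ls.headD []).length
decreasing_by
  cases ls with
  | nil => exact absurd (Or.inl rfl) h
  | cons a t =>
    cases a with
    | nil => exact absurd (Or.inr (by simp)) h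
    | cons x xs => simp

def ex9 (seats : List (List Int)) : List (Int × Int) :=
  (PySem.List.enumerate (pyZipAll seats)).foldl
    (fun results jcol =>
      ((PySem.List.enumerate jcol.2).foldl
        (fun (st : Int × List (Int × Int)) ih =>
          if ih.2 ≤ st.1 then (st.1, st.2 ++ [(ih.1, jcol.1)]) else (ih.2, st.2))
        (0, results)).2)
    []

-- ===== PORT B =====

-- min((len(r) for r in seats), default=0): Python's min is a fold over the iterable.
def pyMinLen (seats : List (List Int)) : Nat :=
  match seats with
  | [] => 0
  | r :: rs => rs.foldl (fun a x => min a x.length) r.length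

def ex9_alt (seats : List (List Int)) : List (Int × Int) :=
  let ncols := pyMinLen seats
  let final :=
    (PySem.List.enumerate seats).foldl
      (fun state irow =>
        (PySem.List.enumerate state).map (fun js =>
          -- row[j]: j is a 0-based in-range index (j < ncols ≤ len(row)), so getD is exact
          let h := irow.2.getD js.1.toNat 0
          if h ≤ js.2.1 then (js.2.1, js.2.2 ++ [(irow.1, js.1)]) else (h, js.2.2)))
      (List.replicate ncols ((0 : Int), ([] : List (Int × Int))))
  final.flatMap (fun p => p.2)

-- ===== PRECONDITION & SPEC =====
def Spec_ex9 (seats : List (List Int)) (out : List (Int × Int)) : Prop := out = ex9_alt seats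
instance (seats : List (List Int)) (out : List (Int × Int)) : Decidable (Spec_ex9 seats out) := by unfold Spec_ex9; infer_instance

-- ===== CLAIM (what is proved, stated in full; the proofs are below) =====
def Claim_equal_ex9 : Prop := ∀ (seats : List (List Int)), Dom_ex9 seats → Spec_ex9 seats (ex9 seats)

-- ===== LEMMAS AND PROOFS =====

-- the common per-seat step (j = column, p = (row index, height))
def cstep (j : Int) (st : Int × List (Int × Int)) (p : Int × Int) : Int × List (Int × Int) :=
  if p.2 ≤ st.1 then (st.1, st.2 ++ [(p.1, j)]) else (p.2, st.2)

def cfold (j : Int) (col : List Int) (s : Int) (st : Int × List (Int × Int)) : Int × List (Int × Int) :=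
  (PySem.List.enumerate col s).foldl (cstep j) st

def colList (seats : List (List Int)) (j : Nat) : List Int := seats.map (fun r => r.getD j 0)

-- min-fold facts
theorem mfold_le (rs : List (List Int)) : ∀ a : Nat, rs.foldl (fun a x => min a x.length) a ≤ a := by
  induction rs with
  | nil => simp
  | cons x rs ih =>
    intro a
    exact le_trans (ih (min a x.length)) (min_le_left _ _)

theorem mfold_le_mem (rs : List (List Int)) : ∀ a : Nat, ∀ x ∈ rs, rs.foldl (fun a x => min a x.length) a ≤ x.length := by
  induction rs with
  | nil => simp
  | cons y rs ih =>
    intro a x hx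
    rcases List.mem_cons.mp hx with h | h
    · subst h
      exact le_trans (mfold_le rs _) (min_le_right _ _)
    · exact ih _ x h

theorem mfold_reached (rs : List (List Int)) : ∀ a : Nat,
    rs.foldl (fun a x => min a x.length) a = a ∨ ∃ x ∈ rs, rs.foldl (fun a x => min a x.length) a = x.length := by
  induction rs with
  | nil => simp
  | cons y rs ih =>
    intro a
    rcases ih (min a y.length) with h | ⟨x, hx, h⟩
    · rcases Nat.le_total a y.length with hle | hle
      · left; simp only [List.foldl_cons, h]; omega
      · right; exact ⟨y, by simp, by simp only [List.foldl_cons, h]; omega⟩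
    · right; exact ⟨x, by simp [hx], by simpa using h⟩

theorem mfold_tail (rs : List (List Int)) : ∀ a : Nat, (∀ x ∈ rs, x ≠ []) → 0 < a →
    (rs.map List.tail).foldl (fun a x => min a x.length) (a - 1)
      = rs.foldl (fun a x => min a x.length) a - 1 := by
  induction rs with
  | nil => simp
  | cons y rs ih =>
    intro a hne ha
    have hy : 0 < y.length := List.length_pos_iff.mpr (hne y (by simp))
    have : min a y.length - 1 = min (a - 1) (y.tail.length) := by
      simp [List.length_tail]; omega
    simp only [List.map_cons, List.foldl_cons, ← this]
    exact ih _ (fun x hx => hne x (by simp [hx])) (by omega)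

theorem pyMinLen_pos_facts (seats : List (List Int)) (h : 0 < pyMinLen seats) :
    seats ≠ [] ∧ (∀ x ∈ seats, x ≠ []) ∧ pyMinLen (seats.map List.tail) = pyMinLen seats - 1 := by
  cases seats with
  | nil => simp [pyMinLen] at h
  | cons r rs =>
    have hmem : ∀ x ∈ r :: rs, 0 < x.length := by
      intro x hx
      rcases List.mem_cons.mp hx with hh | hh
      · subst hh; exact lt_of_lt_of_le h (mfold_le rs _)
      · exact lt_of_lt_of_le h (mfold_le_mem rs _ x hh)
    refine ⟨by simp, fun x hx => List.length_pos_iff.mp (hmem x hx) , ?_⟩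
    have hr : 0 < r.length := hmem r (by simp)
    cases r with
    | nil => simp at hr
    | cons c cs =>
      simp only [pyMinLen, List.map_cons]
      have := mfold_tail rs (c :: cs).length (fun x hx => List.length_pos_iff.mp (hmem x (by simp [hx]))) (by simp)
      simpa using this

theorem pyMinLen_zero_guard (seats : List (List Int)) (h : pyMinLen seats = 0) :
    seats.isEmpty = true ∨ seats.any (fun l => l.isEmpty) = true := by
  cases seats with
  | nil => left; rfl
  | cons r rs =>
    right
    rw [List.any_eq_true]
    simp only [pyMinLen] at h
    rcases mfold_reached rs r.length with hh | ⟨x, hx, hh⟩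
    · exact ⟨r, List.mem_cons_self, List.isEmpty_iff.mpr (List.length_eq_zero_iff.mp (hh ▸ h))⟩
    · exact ⟨x, List.mem_cons_of_mem _ hx, List.isEmpty_iff.mpr (List.length_eq_zero_iff.mp (hh ▸ h))⟩

theorem getD_zero (r : List Int) : r.getD 0 0 = r.headD 0 := by cases r <;> simp

theorem getD_succ (r : List Int) (j : Nat) : r.getD (j + 1) 0 = r.tail.getD j 0 := by
  cases r <;> simp

-- zip(*seats) builds exactly the first pyMinLen columns
theorem pyZipAll_eq : ∀ (n : Nat) (seats : List (List Int)), pyMinLen seats = n →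
    pyZipAll seats = (List.range n).map (fun j => colList seats j) := by
  intro n
  induction n with
  | zero =>
    intro seats h
    rw [pyZipAll, dif_pos (pyMinLen_zero_guard seats h)]
    simp
  | succ n ih =>
    intro seats h
    have ⟨hne, hrows, htail⟩ := pyMinLen_pos_facts seats (by omega)
    have hguard : ¬(seats.isEmpty = true ∨ seats.any (fun l => l.isEmpty) = true) := by
      rintro (hg | hg)
      · exact hne (List.isEmpty_iff.mp hg)
      · rw [List.any_eq_true] at hg
        obtain ⟨x, hx, hxe⟩ := hg
        exact hrows x hx (List.isEmpty_iff.mp hxe)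
    rw [pyZipAll, dif_neg hguard]
    have ihm := ih (seats.map List.tail) (by omega)
    rw [ihm, List.range_succ_eq_map]
    simp only [List.map_cons, List.map_map]
    congr 1
    · simp only [colList]
      exact List.map_congr_left fun r _ => (getD_zero r).symm
    · apply List.map_congr_left
      intro j _
      simp only [colList, Function.comp, List.map_map]
      exact List.map_congr_left fun r _ => (getD_succ r j).symm

-- enumerate of a mapped range
theorem enum_map_range {α : Type} (g : Nat → α) (n : Nat) (s : Int) :
    PySem.List.enumerate ((List.range n).map g) s
      = (List.range n).map (fun (j : Nat) => ((s + (j : Int) : Int), g j)) := by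
  apply List.ext_getElem
  · simp [PySem.List.length_enumerate]
  · intro k h1 h2
    simp [PySem.List.getElem_enumerate]

theorem cfold_cons (j : Int) (h : Int) (t : List Int) (s : Int) (st : Int × List (Int × Int)) :
    cfold j (h :: t) s st = cfold j t (s + 1) (cstep j st (s, h)) := by
  simp [cfold, PySem.List.enumerate_cons]

-- the accumulator threads through cfold's second component
theorem cfold_snd (j : Int) : ∀ (col : List Int) (s m : Int) (acc : List (Int × Int)),
    (cfold j col s (m, acc)).2 = acc ++ (cfold j col s (m, [])).2 := by
  intro col
  induction col with
  | nil => intro s m acc; simp [cfold, PySem.List.enumerate_nil]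
  | cons h t ih =>
    intro s m acc
    rw [cfold_cons, cfold_cons]
    by_cases hc : h ≤ m
    · rw [show cstep j (m, acc) ((s : Int), h) = (m, acc ++ [(s, j)]) from by simp [cstep, hc],
          show cstep j (m, ([] : List (Int × Int))) ((s : Int), h) = (m, [(s, j)]) from by simp [cstep, hc]]
      rw [ih (s+1) m (acc ++ [(s, j)]), ih (s+1) m ([(s, j)])]
      simp
    · rw [show cstep j (m, acc) ((s : Int), h) = (h, acc) from by simp [cstep, hc],
          show cstep j (m, ([] : List (Int × Int))) ((s : Int), h) = (h, ([] : List (Int × Int))) from by simp [cstep, hc]]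
      exact ih (s+1) h acc

-- B's row-major fold maintains, per column, exactly the column fold
theorem bfold (n : Nat) : ∀ (R : List (List Int)) (s : Int) (g : Nat → Int × List (Int × Int)),
    (∀ r ∈ R, n ≤ r.length) →
    (PySem.List.enumerate R s).foldl
        (fun state irow =>
          (PySem.List.enumerate state).map (fun js =>
            let h := irow.2.getD js.1.toNat 0
            if h ≤ js.2.1 then (js.2.1, js.2.2 ++ [(irow.1, js.1)]) else (h, js.2.2)))
        ((List.range n).map g)
      = (List.range n).map (fun (j : Nat) => cfold (j : Int) (R.map (fun r => r.getD j 0)) s (g j)) := by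
  intro R
  induction R with
  | nil =>
    intro s g _
    simp [PySem.List.enumerate_nil, cfold]
  | cons row R ih =>
    intro s g hlen
    simp only [PySem.List.enumerate_cons, List.foldl_cons]
    have hstep :
        (PySem.List.enumerate ((List.range n).map g) 0).map (fun js =>
            let h := row.getD js.1.toNat 0
            if h ≤ js.2.1 then (js.2.1, js.2.2 ++ [((s : Int), js.1)]) else (h, js.2.2))
          = (List.range n).map (fun (j : Nat) => cstep (j : Int) (g j) (s, row.getD j 0)) := by
      rw [enum_map_range]
      rw [List.map_map]
      apply List.map_congr_left
      intro j hj
      simp [cstep, Function.comp]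
    rw [hstep, ih (s + 1) _ (fun r hr => hlen r (by simp [hr]))]
    apply List.map_congr_left
    intro j hj
    simp only [List.map_cons, cfold, PySem.List.enumerate_cons, List.foldl_cons]

-- common spec both ports reduce to
theorem ex9_eq_spec (seats : List (List Int)) :
    ex9 seats = (List.range (pyMinLen seats)).foldl
        (fun res (j : Nat) => res ++ (cfold (j : Int) (colList seats j) 0 (0, [])).2) [] := by
  unfold ex9
  rw [pyZipAll_eq (pyMinLen seats) seats rfl, enum_map_range, List.foldl_map]
  apply PySem.List.foldl_congr_mem
  intro res j _
  have : ((PySem.List.enumerate (colList seats j) 0).foldl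
      (fun (st : Int × List (Int × Int)) ih =>
        if ih.2 ≤ st.1 then (st.1, st.2 ++ [(ih.1, ((0 : Int) + (j : Int)))]) else (ih.2, st.2))
      (0, res)).2 = (cfold (j : Int) (colList seats j) 0 (0, res)).2 := by
    refine congrArg Prod.snd ?_
    apply PySem.List.foldl_congr_mem
    intro acc x _
    simp [cstep]
  simp only [this]
  rw [cfold_snd]

theorem ex9_alt_eq_spec (seats : List (List Int)) :
    ex9_alt seats = (List.range (pyMinLen seats)).foldl
        (fun res (j : Nat) => res ++ (cfold (j : Int) (colList seats j) 0 (0, [])).2) [] := by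
  unfold ex9_alt
  have hrep : List.replicate (pyMinLen seats) ((0 : Int), ([] : List (Int × Int)))
      = (List.range (pyMinLen seats)).map (fun (_ : Nat) => ((0 : Int), ([] : List (Int × Int)))) := by
    simp
  have hlen : ∀ r ∈ seats, pyMinLen seats ≤ r.length := by
    cases seats with
    | nil => simp
    | cons x rs =>
      intro r hr
      rcases List.mem_cons.mp hr with h | h
      · subst h; exact mfold_le rs _
      · exact mfold_le_mem rs _ r h
  simp only [hrep]
  rw [bfold (pyMinLen seats) seats 0 _ hlen]
  rw [List.flatMap_map]
  rw [PySem.List.foldl_append_eq_flatMap]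
  simp [colList]

-- ===== VERDICT (by name: the statement is the Claim_ definition above) =====
theorem ex9_spec : Claim_equal_ex9 := by
  intro seats _
  unfold Spec_ex9
  rw [ex9_eq_spec, ex9_alt_eq_spec]
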